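-- pv_equiv track=rewrite | github.com/saurabh47/Data-structures-and-algorithms | leetcode/problem_1805.py | numDifferentIntegers
-- ===== SOURCE A (Python) =====
-- def numDifferentIntegers(word: str) -> int:
--     def isDigit(char):
--         return ord(char) >= 48 and ord(char) <= 57
--     count = 0
--     numbers = set()
--     start = 0
--     end = 0
--     numStarted = False
--     while(end != len(word)):
--         char = word[end]
--         if(isDigit(char)):
--             if(start == end):
--                 if(char == '0'):
--                     if(end == len(word) - 1):
--                         numStarted = True
--                     elif(isDigit(word[end + 1])):
--                         start += 1
--                     else:
--                         numStarted = True
--                 else: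
--                     numStarted = True
--             end += 1
--         else:
--             if(isDigit(word[start])):
--                 numbers.add(word[start:end])
--                 numStarted = False
--             end += 1
--             start = end
--     # word ended
--     if(numStarted):
--         numbers.add(word[start:end])
--     return len(numbers)
-- ===== SOURCE B (Python) =====
-- def numDifferentIntegers(word: str) -> int:
--     spaced = ''.join(ch if '0' <= ch <= '9' else ' ' for ch in word)
--     distinct = set()
--     for tok in spaced.split():
--         distinct.add(tok.lstrip('0') or '0')
--     return len(distinct)
-- ===== Notes on version B (the rewrite author's own statement) =====
-- stated objective: idiomatic
-- what changed: Replaced A's single-pass index/flag state machine (start/end pointers, numStarted flag, inline leading-zero skipping) by a two-pass extract-then-normalize decomposition: map non-digits to spaces, split into maximal digit tokens, strip each token's leading zeros (an all-zero token becomes a single zero), and count the distinct results.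
import Mathlib
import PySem

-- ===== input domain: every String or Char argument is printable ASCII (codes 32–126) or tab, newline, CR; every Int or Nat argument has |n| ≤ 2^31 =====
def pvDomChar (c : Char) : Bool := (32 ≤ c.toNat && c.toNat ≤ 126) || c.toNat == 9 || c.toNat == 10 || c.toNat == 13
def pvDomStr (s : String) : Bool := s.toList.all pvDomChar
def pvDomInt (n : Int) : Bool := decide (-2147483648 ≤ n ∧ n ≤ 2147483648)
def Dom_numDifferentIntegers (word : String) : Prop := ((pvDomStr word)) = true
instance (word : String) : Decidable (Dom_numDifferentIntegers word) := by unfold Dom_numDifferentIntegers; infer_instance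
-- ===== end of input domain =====

-- B replaces A's interleaved index/flag state machine by a two-pass decomposition:
-- map non-digits to spaces, split into maximal digit tokens, strip each token's leading
-- zeros (an all-zero token becomes a single zero), count the distinct results.
-- Objective: idiomatic; a timing run measured B faster by a constant factor.


-- ===== PORT A =====
-- A's helper `isDigit`: ord(char) >= 48 and ord(char) <= 57
def pvIsDigit (c : Char) : Bool := 48 ≤ c.toNat && c.toNat ≤ 57

-- word[start:end]
def pvSliceStr (cs : List Char) (a b : Nat) : String :=
  String.ofList (PySem.List.slice cs (some (a : Int)) (some (b : Int)))

-- A's while loop.  Python's guard is `end != len(word)`; `end ≤ len` holds from `end = 0`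
-- onward (each iteration does `end += 1` only under the guard), so the `≤`-form guard below
-- is the same test on every reachable state and makes termination evident.  word[end],
-- word[end+1] and word[start] are read via the total pyGetD; all three are in range when read.
def pvLoopA (cs : List Char) (start e : Nat) (numStarted : Bool)
    (numbers : PySem.Set String) : Int :=
  if cs.length ≤ e then
    if numStarted then PySem.Set.len (PySem.Set.add numbers (pvSliceStr cs start e))
    else PySem.Set.len numbers
  else
    let c := PySem.List.pyGetD cs (e : Int) ' '
    if pvIsDigit c then
      (if start = e then
        (if c = '0' then
          (if e = cs.length - 1 then pvLoopA cs start (e+1) true numbers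
           else if pvIsDigit (PySem.List.pyGetD cs ((e : Int) + 1) ' ') then
             pvLoopA cs (start+1) (e+1) numStarted numbers
           else pvLoopA cs start (e+1) true numbers)
         else pvLoopA cs start (e+1) true numbers)
       else pvLoopA cs start (e+1) numStarted numbers)
    else
      if pvIsDigit (PySem.List.pyGetD cs (start : Int) ' ') then
        pvLoopA cs (e+1) (e+1) false (PySem.Set.add numbers (pvSliceStr cs start e))
      else
        pvLoopA cs (e+1) (e+1) numStarted numbers
termination_by cs.length - e
decreasing_by all_goals omega

def numDifferentIntegers (word : String) : Int :=
  pvLoopA word.toList 0 0 false PySem.Set.empty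

-- ===== PORT B =====
-- tok.lstrip('0') or '0'  (str.lstrip with a chars argument: drop leading '0's; exact by hand)
def pvNorm (tok : List Char) : String :=
  let r := tok.dropWhile (· == '0')
  if r.isEmpty then String.ofList ['0'] else String.ofList r

def numDifferentIntegers_alt (word : String) : Int :=
  -- spaced = ''.join(ch if '0' <= ch <= '9' else ' ' for ch in word)
  let spaced := word.toList.map (fun ch => if '0' ≤ ch ∧ ch ≤ '9' then ch else ' ')
  -- for tok in spaced.split(): distinct.add(tok.lstrip('0') or '0')
  let distinct := (PySem.Chars.split₀ spaced).foldl
    (fun s tok => PySem.Set.add s (pvNorm tok)) PySem.Set.empty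
  PySem.Set.len distinct

-- ===== PRECONDITION & SPEC =====
def Spec_numDifferentIntegers (word : String) (out : Int) : Prop := out = numDifferentIntegers_alt word
instance (word : String) (out : Int) : Decidable (Spec_numDifferentIntegers word out) := by unfold Spec_numDifferentIntegers; infer_instance

-- ===== CLAIM (what is proved, stated in full; the proofs are below) =====
def Claim_equal_numDifferentIntegers : Prop := ∀ (word : String), Dom_numDifferentIntegers word → Spec_numDifferentIntegers word (numDifferentIntegers word)

-- ===== LEMMAS AND PROOFS =====

theorem pvIsDigit_iff (c : Char) : pvIsDigit c = true ↔ ('0' ≤ c ∧ c ≤ '9') := by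
  rw [show ('0' ≤ c ∧ c ≤ '9') ↔ (48 ≤ c.toNat ∧ c.toNat ≤ 57) from by
    constructor
    · rintro ⟨h1, h2⟩
      exact ⟨UInt32.le_iff_toNat_le.mp h1, UInt32.le_iff_toNat_le.mp h2⟩
    · rintro ⟨h1, h2⟩
      exact ⟨UInt32.le_iff_toNat_le.mpr h1, UInt32.le_iff_toNat_le.mpr h2⟩]
  simp [pvIsDigit]

theorem digit_not_space (c : Char) (h : pvIsDigit c = true) : PySem.Chars.isspace c = false := by
  simp [pvIsDigit] at h
  simp [PySem.Chars.isspace]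
  omega

-- the maximal digit runs of a character list
def pvRuns (cs : List Char) : List (List Char) :=
  match cs with
  | [] => []
  | c :: t =>
    if pvIsDigit c then (c :: t.takeWhile pvIsDigit) :: pvRuns (t.dropWhile pvIsDigit)
    else pvRuns t
termination_by cs.length
decreasing_by
  · have := List.length_dropWhile_le (p := pvIsDigit) (l := t); simp; omega
  · simp

-- B's split₀-loop, characterized: splitting the digits-to-spaces image yields the digit runs
theorem pvGo_eq (cs cur : List Char) (acc : List (List Char)) :
    PySem.Chars.split₀.go (cs.map (fun ch => if '0' ≤ ch ∧ ch ≤ '9' then ch else ' ')) cur acc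
      = acc.reverse ++ (if cur.isEmpty then pvRuns cs
          else (cur.reverse ++ cs.takeWhile pvIsDigit) :: pvRuns (cs.dropWhile pvIsDigit)) := by
  induction cs generalizing cur acc with
  | nil =>
    cases cur with
    | nil => simp [PySem.Chars.split₀.go, pvRuns]
    | cons a l => simp [PySem.Chars.split₀.go, pvRuns]
  | cons c t ih =>
    by_cases hd : pvIsDigit c = true
    · have hsp : (if '0' ≤ c ∧ c ≤ '9' then c else ' ') = c := by
        rw [if_pos ((pvIsDigit_iff c).mp hd)]
      have hns : PySem.Chars.isspace c = false := digit_not_space c hd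
      simp only [List.map_cons, hsp, PySem.Chars.split₀.go, hns, Bool.false_eq_true, if_false,
        ih (c :: cur) acc]
      cases cur with
      | nil => simp [pvRuns, hd]
      | cons a l => simp [hd]
    · have hsp : (if '0' ≤ c ∧ c ≤ '9' then c else ' ') = ' ' := by
        rw [if_neg (fun h => hd ((pvIsDigit_iff c).mpr h))]
      simp only [List.map_cons, hsp, PySem.Chars.split₀.go,
        show PySem.Chars.isspace ' ' = true from by decide, if_true]
      have hruns : pvRuns (c :: t) = pvRuns t := by rw [pvRuns, if_neg hd]
      cases cur with
      | nil =>
        simp only [List.isEmpty_nil, if_true, ih [] acc, List.isEmpty_nil, hruns]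
      | cons a l =>
        simp only [List.isEmpty_cons, ih [] ((a::l).reverse :: acc)]
        have htw : List.takeWhile pvIsDigit (c :: t) = [] := by
          simp [hd]
        have hdw : List.dropWhile pvIsDigit (c :: t) = c :: t := by
          simp [hd]
        simp [htw, hdw, hruns]

theorem pvSplit_eq_runs (cs : List Char) :
    PySem.Chars.split₀ (cs.map (fun ch => if '0' ≤ ch ∧ ch ≤ '9' then ch else ' ')) = pvRuns cs := by
  rw [PySem.Chars.split₀]
  simpa using pvGo_eq cs [] []

-- the abstract form of A's loop: p = word[start:end] (the pending digits), d = word[end:]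
def pvMach (p d : List Char) (numbers : PySem.Set String) : Int :=
  match d with
  | [] => if p.isEmpty then PySem.Set.len numbers
          else PySem.Set.len (PySem.Set.add numbers (String.ofList p))
  | c :: d' =>
    if pvIsDigit c then
      (if p.isEmpty then
        (if c = '0' then
          (match d' with
           | [] => pvMach [c] [] numbers
           | c2 :: t2 => if pvIsDigit c2 then pvMach [] (c2 :: t2) numbers
                         else pvMach [c] (c2 :: t2) numbers)
         else pvMach [c] d' numbers)
       else pvMach (p ++ [c]) d' numbers)
    else
      if p.isEmpty then pvMach [] d' numbers
      else pvMach [] d' (PySem.Set.add numbers (String.ofList p))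
termination_by d.length
decreasing_by all_goals simp

-- the normalized tokens still to be added, given pending p and remaining d
def pvTokens (p d : List Char) : List String :=
  if p.isEmpty then (pvRuns d).map pvNorm
  else String.ofList (p ++ d.takeWhile pvIsDigit) :: (pvRuns (d.dropWhile pvIsDigit)).map pvNorm

theorem pvNorm_cons_zero (x : List Char) : pvNorm ('0' :: x) = pvNorm x := by
  simp [pvNorm]

theorem pvNorm_cons_ne_zero (c : Char) (x : List Char) (h : ¬ c = '0') :
    pvNorm (c :: x) = String.ofList (c :: x) := by
  simp [pvNorm, h]

theorem pvMach_eq_tokens (d p : List Char) (numbers : PySem.Set String) :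
    pvMach p d numbers = PySem.Set.len (PySem.Set.update numbers (pvTokens p d)) := by
  induction d generalizing p numbers with
  | nil =>
    rw [pvMach.eq_def]; dsimp only
    cases p with
    | nil => simp [pvTokens, pvRuns, PySem.Set.update]
    | cons a l => simp [pvTokens, pvRuns, PySem.Set.update]
  | cons c d' ih =>
    rw [pvMach.eq_def]; dsimp only
    by_cases hd : pvIsDigit c = true
    · rw [if_pos hd]
      cases p with
      | nil =>
        simp only [List.isEmpty_nil, if_true]
        by_cases h0 : c = '0'
        · rw [if_pos h0]
          cases d' with
          | nil =>
            rw [pvMach.eq_def]; dsimp only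
            simp [pvTokens, pvRuns, h0, pvNorm, PySem.Set.update,
              show pvIsDigit '0' = true from by decide]
          | cons c2 t2 =>
            dsimp only
            by_cases hd2 : pvIsDigit c2 = true
            · rw [if_pos hd2, ih]
              simp only [pvTokens, List.isEmpty_nil, if_true]
              rw [show pvRuns (c :: c2 :: t2)
                    = (c :: List.takeWhile pvIsDigit (c2 :: t2))
                        :: pvRuns (List.dropWhile pvIsDigit (c2 :: t2)) from by
                  rw [pvRuns, if_pos hd]]
              simp only [List.takeWhile_cons, List.dropWhile_cons, hd2, if_true,
                List.map_cons, h0, pvNorm_cons_zero]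
              rw [show pvRuns (c2 :: t2)
                    = (c2 :: List.takeWhile pvIsDigit t2) :: pvRuns (List.dropWhile pvIsDigit t2) from by
                  rw [pvRuns, if_pos hd2]]
              simp
            · rw [if_neg hd2, ih]
              simp only [pvTokens, List.isEmpty_nil, List.isEmpty_cons, Bool.false_eq_true,
                if_false, if_true]
              rw [show pvRuns (c :: c2 :: t2)
                    = (c :: List.takeWhile pvIsDigit (c2 :: t2))
                        :: pvRuns (List.dropWhile pvIsDigit (c2 :: t2)) from by
                  rw [pvRuns, if_pos hd]]
              simp only [List.takeWhile_cons, List.dropWhile_cons, hd2,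
                Bool.false_eq_true, if_false, List.map_cons, h0]
              rw [show pvNorm ['0'] = "0" from by decide]
              simp
        · rw [if_neg h0, ih]
          simp only [pvTokens, List.isEmpty_nil, List.isEmpty_cons, if_true]
          rw [pvRuns, if_pos hd]
          simp [pvNorm_cons_ne_zero c _ h0]
      | cons a l =>
        simp only [List.isEmpty_cons, Bool.false_eq_true, if_false, ih]
        simp only [pvTokens, List.isEmpty_cons, Bool.false_eq_true, if_false]
        simp [hd]
    · rw [if_neg hd]
      cases p with
      | nil =>
        simp only [List.isEmpty_nil, if_true, ih]
        simp only [pvTokens, List.isEmpty_nil, if_true]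
        rw [pvRuns, if_neg hd]
      | cons a l =>
        simp only [List.isEmpty_cons, Bool.false_eq_true, if_false, ih]
        simp only [pvTokens, List.isEmpty_cons, List.isEmpty_nil, Bool.false_eq_true, if_false, if_true]
        have htw : List.takeWhile pvIsDigit (c :: d') = [] := by simp [hd]
        have hdw : List.dropWhile pvIsDigit (c :: d') = c :: d' := by simp [hd]
        rw [htw, hdw]
        rw [show pvRuns (c :: d') = pvRuns d' from by rw [pvRuns, if_neg hd]]
        simp [PySem.Set.update]

theorem pvSlice_eq (cs : List Char) (a b : Nat) :
    pvSliceStr cs a b = String.ofList ((cs.drop a).take (b - a)) := by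
  rw [pvSliceStr, PySem.List.slice_natCast]

theorem pvGetD_eq (cs : List Char) (i : Nat) (h : i < cs.length) :
    PySem.List.pyGetD cs (i : Int) ' ' = cs[i] := by
  rw [PySem.List.pyGetD_natCast, List.getD_eq_getElem cs ' ' h]

theorem pvTake_succ (cs : List Char) (start e : Nat) (_hse : start ≤ e) (he : e < cs.length) :
    (cs.drop start).take (e + 1 - start) = (cs.drop start).take (e - start) ++ [cs[e]] := by
  have h1 : e + 1 - start = (e - start) + 1 := by omega
  rw [h1, List.take_add_one]
  have h2 : (cs.drop start)[e - start]? = some cs[e] := by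
    rw [List.getElem?_drop]
    rw [List.getElem?_eq_getElem (by omega)]
    congr 1
    congr 1
    omega
  simp [h2]

theorem pvPending_len (cs : List Char) (start e : Nat) (_hse : start ≤ e) (he : e ≤ cs.length) :
    ((cs.drop start).take (e - start)).length = e - start := by
  simp [List.length_take, List.length_drop]
  omega

theorem pvPending_head (cs : List Char) (start e : Nat) (hse : start < e) (he : e ≤ cs.length) :
    (cs.drop start).take (e - start)
      = cs[start]'(by omega) :: (cs.drop (start+1)).take (e - (start+1)) := by
  rw [List.drop_eq_getElem_cons (by omega : start < cs.length)]
  rw [show e - start = (e - (start+1)) + 1 from by omega, List.take_succ_cons]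

-- A's index loop equals the abstract machine on the pending slice and the remaining suffix
theorem pvLoop_eq_mach (cs : List Char) (k : Nat) (start e : Nat) (numbers : PySem.Set String)
    (hk : cs.length - e ≤ k) (hse : start ≤ e) (hel : e ≤ cs.length)
    (hdig : ∀ x ∈ (cs.drop start).take (e - start), pvIsDigit x = true) :
    pvLoopA cs start e (decide (start < e)) numbers
      = pvMach ((cs.drop start).take (e - start)) (cs.drop e) numbers := by
  induction k generalizing start e numbers with
  | zero =>
    have he : e = cs.length := by omega
    rw [pvLoopA, if_pos (by omega), pvMach.eq_def]
    rw [List.drop_eq_nil_of_le (by omega)]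
    have hlen := pvPending_len cs start e hse hel
    by_cases hlt : start < e
    · rw [if_pos (by simpa using hlt), show ((cs.drop start).take (e - start)).isEmpty = false from by
        rw [List.isEmpty_eq_false_iff_exists_mem]
        have : ((cs.drop start).take (e - start)).length > 0 := by omega
        exact ⟨_, List.getElem_mem (by omega)⟩]
      rw [pvSlice_eq]
      simp
    · rw [if_neg (by simpa using hlt), show ((cs.drop start).take (e - start)).isEmpty = true from by
        rw [List.isEmpty_iff_length_eq_zero]; omega]
      simp
  | succ k ih =>
    by_cases hee : cs.length ≤ e
    · -- terminal, same as zero case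
      have he : e = cs.length := by omega
      rw [pvLoopA, if_pos (by omega), pvMach.eq_def]
      rw [List.drop_eq_nil_of_le (by omega)]
      have hlen := pvPending_len cs start e hse hel
      by_cases hlt : start < e
      · rw [if_pos (by simpa using hlt), show ((cs.drop start).take (e - start)).isEmpty = false from by
          rw [List.isEmpty_eq_false_iff_exists_mem]
          have : ((cs.drop start).take (e - start)).length > 0 := by omega
          exact ⟨_, List.getElem_mem (by omega)⟩]
        rw [pvSlice_eq]
        simp
      · rw [if_neg (by simpa using hlt), show ((cs.drop start).take (e - start)).isEmpty = true from by
          rw [List.isEmpty_iff_length_eq_zero]; omega]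
        simp
    · have he : e < cs.length := by omega
      have hdropE : cs.drop e = cs[e] :: cs.drop (e+1) := List.drop_eq_getElem_cons he
      have hlen := pvPending_len cs start e hse hel
      rw [pvLoopA, if_neg hee]
      simp only [pvGetD_eq cs e he]
      rw [hdropE, pvMach.eq_def]
      dsimp only
      by_cases hd : pvIsDigit cs[e] = true
      · rw [if_pos hd, if_pos hd]
        by_cases hs : start = e
        · subst hs
          rw [if_pos rfl, show ((cs.drop start).take (start - start)).isEmpty = true from by simp,
            if_pos rfl]
          by_cases h0 : cs[start] = '0'
          · rw [if_pos h0, if_pos h0]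
            by_cases hlast : start = cs.length - 1
            · rw [if_pos hlast]
              have hd1 : cs.drop (start+1) = [] := List.drop_eq_nil_of_le (by omega)
              rw [hd1]
              have := ih (start) (start+1) numbers (by omega) (by omega) (by omega)
                (by rw [pvTake_succ cs start start (le_refl _) he]
                    simp [hd])
              rw [show decide (start < start + 1) = true from by simp] at this
              rw [this, pvTake_succ cs start start (le_refl _) he, hd1]
              simp
            · rw [if_neg hlast]
              have he1 : start + 1 < cs.length := by omega
              have hdropE1 : cs.drop (start+1) = cs[start+1] :: cs.drop (start+2) :=
                List.drop_eq_getElem_cons he1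
              rw [hdropE1]
              dsimp only
              rw [show ((start : Int) + 1) = ((start + 1 : Nat) : Int) from by push_cast; ring]
              rw [pvGetD_eq cs (start+1) he1]
              by_cases hd2 : pvIsDigit cs[start+1] = true
              · rw [if_pos hd2, if_pos hd2]
                have := ih (start+1) (start+1) numbers (by omega) (le_refl _) (by omega)
                  (by simp)
                rw [show decide (start + 1 < start + 1) = false from by simp] at this
                rw [show decide (start < start) = false from by simp]
                rw [this]
                simp only [Nat.sub_self, List.take_zero, ← hdropE1]
              · rw [if_neg hd2, if_neg hd2]
                have := ih start (start+1) numbers (by omega) (by omega) (by omega)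
                  (by rw [pvTake_succ cs start start (le_refl _) he]
                      simp [hd])
                rw [show decide (start < start + 1) = true from by simp] at this
                rw [this, pvTake_succ cs start start (le_refl _) he]
                simp only [Nat.sub_self, List.take_zero, List.nil_append, ← hdropE1]
          · rw [if_neg h0, if_neg h0]
            have := ih start (start+1) numbers (by omega) (by omega) (by omega)
              (by rw [pvTake_succ cs start start (le_refl _) he]
                  simp [hd])
            rw [show decide (start < start + 1) = true from by simp] at this
            rw [this, pvTake_succ cs start start (le_refl _) he]
            simp
        · have hlt : start < e := by omega
          rw [if_neg hs, show ((cs.drop start).take (e - start)).isEmpty = false from by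
            rw [List.isEmpty_eq_false_iff_exists_mem]
            have : ((cs.drop start).take (e - start)).length > 0 := by omega
            exact ⟨_, List.getElem_mem (by omega)⟩]
          have := ih start (e+1) numbers (by omega) (by omega) (by omega)
            (by rw [pvTake_succ cs start e (by omega) he]
                intro x hx
                rcases List.mem_append.mp hx with h | h
                · exact hdig x h
                · simp at h; subst h; exact hd)
          rw [show decide (start < e + 1) = true from decide_eq_true (by omega)] at this
          rw [show decide (start < e) = true from decide_eq_true (by omega)]
          rw [this, pvTake_succ cs start e (by omega) he]
          simp
      · rw [if_neg hd, if_neg hd]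
        by_cases hs : start = e
        · subst hs
          rw [show ((cs.drop start).take (start - start)).isEmpty = true from by simp]
          rw [pvGetD_eq cs start he, if_neg hd, if_pos rfl]
          have := ih (start+1) (start+1) numbers (by omega) (le_refl _) (by omega) (by simp)
          rw [show decide (start + 1 < start + 1) = false from by simp] at this
          rw [show decide (start < start) = false from by simp]
          rw [this]
          simp
        · have hlt : start < e := by omega
          rw [show ((cs.drop start).take (e - start)).isEmpty = false from by
            rw [List.isEmpty_eq_false_iff_exists_mem]
            have : ((cs.drop start).take (e - start)).length > 0 := by omega
            exact ⟨_, List.getElem_mem (by omega)⟩]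
          have hhead : pvIsDigit (cs[start]'(by omega)) = true := by
            apply hdig
            rw [pvPending_head cs start e hlt hel]
            exact List.mem_cons_self
          rw [pvGetD_eq cs start (by omega), if_pos hhead]
          have := ih (e+1) (e+1) (PySem.Set.add numbers (pvSliceStr cs start e))
            (by omega) (le_refl _) (by omega) (by simp)
          rw [show decide (e + 1 < e + 1) = false from by simp] at this
          rw [this, pvSlice_eq]
          simp

-- ===== VERDICT (by name: the statement is the Claim_ definition above) =====
theorem numDifferentIntegers_spec : Claim_equal_numDifferentIntegers := by
  intro word _
  simp only [Spec_numDifferentIntegers, numDifferentIntegers, numDifferentIntegers_alt]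
  have hA := pvLoop_eq_mach word.toList word.toList.length 0 0 PySem.Set.empty
    (by omega) (le_refl 0) (by omega) (by simp)
  simp only [decide_eq_false (lt_irrefl 0), Nat.sub_zero, List.drop_zero, List.take_zero] at hA
  rw [hA, pvMach_eq_tokens]
  rw [pvSplit_eq_runs]
  simp only [pvTokens, List.isEmpty_nil, if_true]
  rw [PySem.Set.update, List.foldl_map]
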